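-- pv_equiv track=rewrite | github.com/Ligzerrr/04-Functions-07-Arrays-0.8-FileHandling | 04-Functions 07-Arrays 0.8-FileHandling/04. Functions/7. Practice makes Perfect/7.28.py | f
-- ===== SOURCE A (Python) =====
-- def f(dice):
--     max_streak = 1
--     current_streak = 1
--     most_rolled = dice[0]
--     for i in range(1, len(dice)):
--         if dice[i] == dice[i - 1]:
--             current_streak += 1
--         else:
--             if current_streak > max_streak:
--                 max_streak = current_streak
--                 most_rolled = dice[i - 1]
--             current_streak = 1
--
--     if current_streak > max_streak:
--         most_rolled = dice[-1]
--         max_streak = current_streak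
--     return int(most_rolled)
-- ===== SOURCE B (Python) =====
-- def f(dice):
--     # Stage 1: build the full run-length encoding of the list.
--     rle = []
--     for x in dice:
--         if rle and rle[-1][0] == x:
--             rle[-1] = (x, rle[-1][1] + 1)
--         else:
--             rle.append((x, 1))
--     # Stage 2: pick the first run with maximal length.
--     return int(max(rle, key=lambda p: p[1])[0])
-- ===== Notes on version B (the rewrite author's own statement) =====
-- stated objective: alternative
-- what changed: Replaces A's online streak counters (current/max streak with a trailing-run fixup) by two staged passes over an explicit data structure: first build the complete run-length encoding of the list, then select the first maximal-length run with max(key=len).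
import Mathlib
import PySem

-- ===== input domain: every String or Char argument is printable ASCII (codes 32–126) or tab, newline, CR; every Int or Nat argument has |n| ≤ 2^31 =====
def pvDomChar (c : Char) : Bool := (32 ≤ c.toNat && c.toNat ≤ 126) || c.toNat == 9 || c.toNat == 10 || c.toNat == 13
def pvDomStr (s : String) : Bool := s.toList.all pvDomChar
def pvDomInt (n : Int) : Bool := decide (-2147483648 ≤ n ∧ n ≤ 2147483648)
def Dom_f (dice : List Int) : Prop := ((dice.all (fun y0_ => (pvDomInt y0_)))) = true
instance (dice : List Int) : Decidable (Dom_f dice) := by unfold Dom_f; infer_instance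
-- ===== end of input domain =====

-- B replaces A's online streak counters by two staged passes — build the full run-length encoding, then take the first maximal run (alternative decomposition, same cost); return-value equivalence on nonempty lists.


-- ===== PORT A =====
-- literal transliteration: state (max_streak, current_streak, most_rolled), loop over range(1, len(dice))
def f (dice : List Int) : Int :=
  let s := (PySem.List.pyRange 1 (dice.length : Int) 1).foldl
    (fun (st : Int × Int × Int) (i : Int) =>
      if PySem.List.pyGetD dice i 0 = PySem.List.pyGetD dice (i - 1) 0 then
        (st.1, st.2.1 + 1, st.2.2)
      else if st.2.1 > st.1 then
        (st.2.1, 1, PySem.List.pyGetD dice (i - 1) 0)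
      else
        (st.1, 1, st.2.2))
    (1, 1, PySem.List.pyGetD dice 0 0)
  if s.2.1 > s.1 then PySem.List.pyGetD dice (-1) 0 else s.2.2

-- ===== PORT B =====
-- loop body of Source B's first pass: extend the last run of the RLE or open a new one
def stepRLE (acc : List (Int × Int)) (x : Int) : List (Int × Int) :=
  match acc.getLast? with
  | some p => if p.1 = x then acc.dropLast ++ [(x, p.2 + 1)] else acc ++ [(x, 1)]
  | none => acc ++ [(x, 1)]

-- Source B: build the RLE by the fold above, then max(rle, key=λp. p[1]) — first maximal run
-- (max([]) raises ValueError in Python; the none branch is unreachable under Pre_f)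
def f_alt (dice : List Int) : Int :=
  let rle := dice.foldl stepRLE []
  match PySem.List.max? rle (fun p => p.2) with
  | some p => p.1
  | none => 0

-- ===== PRECONDITION & SPEC =====
-- A raises IndexError on the empty input (dice[0]); B's max raises ValueError there; everywhere else both return.
def Pre_f (dice : List Int) : Prop := dice ≠ []
instance (dice : List Int) : Decidable (Pre_f dice) := by unfold Pre_f; infer_instance
def pvWitness_f : List Int := [2, 2, 5]

def Spec_f (dice : List Int) (out : Int) : Prop := out = f_alt dice
instance (dice : List Int) (out : Int) : Decidable (Spec_f dice out) := by unfold Spec_f; infer_instance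

-- ===== CLAIM (what is proved, stated in full; the proofs are below) =====
def Claim_equal_f : Prop := ∀ (dice : List Int), Dom_f dice → Pre_f dice → Spec_f dice (f dice)

-- ===== LEMMAS AND PROOFS =====

-- A's loop body as a function of the state and the adjacent pair (dice[i-1], dice[i])
def stepA (st : Int × Int × Int) (pq : Int × Int) : Int × Int × Int :=
  if pq.2 = pq.1 then (st.1, st.2.1 + 1, st.2.2)
  else if st.2.1 > st.1 then (st.2.1, 1, pq.1)
  else (st.1, 1, st.2.2)

-- A's loop in structural form: prev is the element just processed
def tailA (prev ms cs mr : Int) : List Int → Int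
  | [] => if cs > ms then prev else mr
  | x :: xs =>
      if x = prev then tailA x ms (cs + 1) mr xs
      else if cs > ms then tailA x cs 1 prev xs
      else tailA x ms 1 mr xs

-- the run selection (value of the first run of strictly greatest length)
def sel (bv bl : Int) : List (Int × Int) → Int
  | [] => bv
  | (v, k) :: rs => if k > bl then sel v k rs else sel bv bl rs

-- length of the maximal prefix equal to v, and the remainder
def countRun (v : Int) : List Int → Nat × List Int
  | [] => (0, [])
  | x :: xs => if x = v then ((countRun v xs).1 + 1, (countRun v xs).2) else (0, x :: xs)

theorem countRun_len_le (v : Int) : ∀ xs : List Int, (countRun v xs).2.length ≤ xs.length := by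
  intro xs
  induction xs with
  | nil => simp [countRun]
  | cons x xs ih =>
      by_cases h : x = v <;> simp [countRun, h]
      omega

-- the run-length encoding, recursively
def runs : List Int → List (Int × Int)
  | [] => []
  | x :: xs => (x, ((countRun x xs).1 : Int) + 1) :: runs (countRun x xs).2
  termination_by xs => xs.length
  decreasing_by
    simpa using Nat.lt_succ_of_le (countRun_len_le x xs)

theorem map_pair_pyRange (dice : List Int) :
    (PySem.List.pyRange 1 (dice.length : Int) 1).map
      (fun i => (PySem.List.pyGetD dice (i - 1) 0, PySem.List.pyGetD dice i 0))
    = dice.zip dice.tail := by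
  rw [PySem.List.pyRange_one]
  simp only [List.map_map]
  apply List.ext_getElem
  · simp only [List.length_map, List.length_range, List.length_zip, List.length_tail]
    omega
  · intro k h1 h2
    simp only [List.getElem_map, List.getElem_range, Function.comp_apply]
    have hk : k + 1 < dice.length := by
      simp at h1; omega
    have e1 : (1 : Int) + (k : Int) - 1 = ((k : Nat) : Int) := by omega
    have e2 : (1 : Int) + (k : Int) = (((k + 1 : Nat)) : Int) := by push_cast; ring
    rw [e1, e2, PySem.List.pyGetD_natCast, PySem.List.pyGetD_natCast]
    rw [List.getElem_zip, List.getElem_tail,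
        List.getD_eq_getElem _ _ (by omega), List.getD_eq_getElem _ _ (by omega)]

theorem foldl_zip_tailA : ∀ (rest : List Int) (d ms cs mr : Int),
    (if (((d :: rest).zip rest).foldl stepA (ms, cs, mr)).2.1 >
        (((d :: rest).zip rest).foldl stepA (ms, cs, mr)).1
     then (d :: rest).getLast (by simp)
     else (((d :: rest).zip rest).foldl stepA (ms, cs, mr)).2.2)
    = tailA d ms cs mr rest := by
  intro rest
  induction rest with
  | nil => intro d ms cs mr; simp [tailA]
  | cons x xs ih =>
      intro d ms cs mr
      have hl : (d :: x :: xs).getLast (by simp) = (x :: xs).getLast (by simp) :=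
        List.getLast_cons (by simp)
      simp only [List.zip_cons_cons, List.foldl_cons, hl, tailA, stepA]
      by_cases h1 : x = d
      · rw [if_pos h1, if_pos h1]
        exact ih x ms (cs + 1) mr
      · rw [if_neg h1, if_neg h1]
        by_cases h2 : cs > ms
        · rw [if_pos h2, if_pos h2]; exact ih x cs 1 d
        · rw [if_neg h2, if_neg h2]; exact ih x ms 1 mr

-- A, characterized structurally
theorem f_eq_tailA (d : Int) (rest : List Int) :
    f (d :: rest) = tailA d 1 1 d rest := by
  have hfold : (PySem.List.pyRange 1 ((d :: rest).length : Int) 1).foldl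
      (fun (st : Int × Int × Int) (i : Int) =>
        if PySem.List.pyGetD (d :: rest) i 0 = PySem.List.pyGetD (d :: rest) (i - 1) 0 then
          (st.1, st.2.1 + 1, st.2.2)
        else if st.2.1 > st.1 then
          (st.2.1, 1, PySem.List.pyGetD (d :: rest) (i - 1) 0)
        else
          (st.1, 1, st.2.2)) (1, 1, PySem.List.pyGetD (d :: rest) 0 0)
      = ((d :: rest).zip rest).foldl stepA (1, 1, d) := by
    have hm := map_pair_pyRange (d :: rest)
    rw [List.tail_cons] at hm
    rw [← hm, List.foldl_map]
    simp [stepA, PySem.List.pyGetD_zero_cons]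
  show (if _ then PySem.List.pyGetD (d :: rest) (-1) 0 else _) = _
  rw [hfold, PySem.List.pyGetD_neg_one (h := by simp)]
  exact foldl_zip_tailA rest d 1 1 d

-- countRun measures the continuation of A's current streak
theorem tailA_countRun : ∀ (n : Nat) (xs : List Int), xs.length ≤ n →
    ∀ (prev ms cs mr : Int),
    tailA prev ms cs mr xs =
      (match (countRun prev xs).2 with
       | [] => if cs + ((countRun prev xs).1 : Int) > ms then prev else mr
       | y :: ys =>
           if cs + ((countRun prev xs).1 : Int) > ms then
             tailA y (cs + ((countRun prev xs).1 : Int)) 1 prev ys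
           else tailA y ms 1 mr ys) := by
  intro n
  induction n with
  | zero =>
      intro xs hxs prev ms cs mr
      have : xs = [] := List.length_eq_zero_iff.mp (Nat.le_zero.mp hxs)
      subst this; simp [tailA, countRun]
  | succ n ih =>
      intro xs hxs prev ms cs mr
      match xs with
      | [] => simp [tailA, countRun]
      | x :: xs' =>
          by_cases h : x = prev
          · subst h
            rw [tailA, if_pos rfl]
            rw [ih xs' (by simp at hxs; omega) x ms (cs + 1) mr]
            have hcr : countRun x (x :: xs') = ((countRun x xs').1 + 1, (countRun x xs').2) := by
              simp [countRun]
            rw [hcr]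
            have e : cs + 1 + ((countRun x xs').1 : Int)
                 = cs + ((((countRun x xs').1 + 1, (countRun x xs').2).1 : Nat) : Int) := by
              push_cast; ring
            simp only [e]
          · rw [tailA, if_neg h]
            have hcr : countRun prev (x :: xs') = (0, x :: xs') := by
              simp [countRun, h]
            rw [hcr]
            simp

-- the main run-boundary correspondence: at the start of a fresh streak (cs = 1 at value v),
-- A's remaining computation is exactly the selection over the remaining runs.
theorem tailA_eq_sel : ∀ (n : Nat) (xs : List Int), xs.length ≤ n →
    ∀ (v ms mr : Int), tailA v ms 1 mr xs = sel mr ms (runs (v :: xs)) := by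
  intro n
  induction n with
  | zero =>
      intro xs hxs v ms mr
      have : xs = [] := List.length_eq_zero_iff.mp (Nat.le_zero.mp hxs)
      subst this
      simp [tailA, runs, countRun, sel]
  | succ n ih =>
      intro xs hxs v ms mr
      rw [tailA_countRun (xs.length) xs le_rfl v ms 1 mr, runs]
      match hr : (countRun v xs).2 with
      | [] =>
          simp only [runs, sel]
          have : (1 : Int) + ((countRun v xs).1 : Int) = ((countRun v xs).1 : Int) + 1 := by ring
          rw [this]
      | y :: ys =>
          have hlen : ys.length ≤ n := by
            have := countRun_len_le v xs
            rw [hr] at this; simp at this; omega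
          simp only [sel]
          have e : (1 : Int) + ((countRun v xs).1 : Int) = ((countRun v xs).1 : Int) + 1 := by ring
          rw [e]
          by_cases h : ((countRun v xs).1 : Int) + 1 > ms
          · rw [if_pos h, if_pos h, ih ys hlen y (((countRun v xs).1 : Int) + 1) v]
          · rw [if_neg h, if_neg h, ih ys hlen y ms mr]

-- ===== B-side lemmas =====

-- B's first pass computes exactly the recursive run-length encoding
theorem foldl_stepRLE : ∀ (xs : List Int) (acc : List (Int × Int)) (v k : Int),
    List.foldl stepRLE (acc ++ [(v, k)]) xs
      = acc ++ (v, k + ((countRun v xs).1 : Int)) :: runs ((countRun v xs).2) := by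
  intro xs
  induction xs with
  | nil => intro acc v k; simp [countRun, runs]
  | cons x xs ih =>
      intro acc v k
      rw [List.foldl_cons]
      have hstep : stepRLE (acc ++ [(v, k)]) x =
          if v = x then acc ++ [(x, k + 1)] else (acc ++ [(v, k)]) ++ [(x, 1)] := by
        simp [stepRLE]
      by_cases h : v = x
      · subst h
        rw [hstep, if_pos rfl, ih acc v (k + 1)]
        have hcr : countRun v (v :: xs) = ((countRun v xs).1 + 1, (countRun v xs).2) := by
          simp [countRun]
        rw [hcr]
        have e : k + 1 + ((countRun v xs).1 : Int)
            = k + ((((countRun v xs).1 + 1 : Nat)) : Int) := by push_cast; ring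
        rw [e]
      · rw [hstep, if_neg h, ih (acc ++ [(v, k)]) x 1]
        have h' : ¬ x = v := fun he => h he.symm
        have hcr : countRun v (x :: xs) = (0, x :: xs) := by
          simp [countRun, h']
        rw [hcr, runs]
        have e : (1 : Int) + ((countRun x xs).1 : Int) = ((countRun x xs).1 : Int) + 1 := by ring
        simp [e]

theorem rle_eq_runs (d : Int) (rest : List Int) :
    (d :: rest).foldl stepRLE [] = runs (d :: rest) := by
  have h0 : stepRLE [] d = [] ++ [(d, 1)] := by simp [stepRLE]
  rw [List.foldl_cons, h0, foldl_stepRLE rest [] d 1, runs]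
  have e : (1 : Int) + ((countRun d rest).1 : Int) = ((countRun d rest).1 : Int) + 1 := by ring
  simp [e]

-- the pair-valued running maximum behind PySem.List.max?
def selP (b : Int × Int) : List (Int × Int) → Int × Int
  | [] => b
  | r :: rs => if b.2 < r.2 then selP r rs else selP b rs

theorem max?_selP : ∀ (rs : List (Int × Int)) (b : Int × Int),
    PySem.List.max? (b :: rs) (fun p : Int × Int => p.2) = some (selP b rs) := by
  intro rs
  induction rs with
  | nil => intro b; simp [PySem.List.max?, selP]
  | cons r rs ih =>
      intro b
      have h1 : PySem.List.max? (b :: r :: rs) (fun p : Int × Int => p.2)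
          = PySem.List.max? ((if b.2 < r.2 then r else b) :: rs) (fun p : Int × Int => p.2) := by
        simp only [PySem.List.max?, List.foldl_cons]
        by_cases h : b.2 < r.2 <;> simp [h]
      rw [h1, ih, selP]
      by_cases h : b.2 < r.2 <;> simp [h]

theorem selP_fst_eq_sel : ∀ (rs : List (Int × Int)) (v k : Int),
    (selP (v, k) rs).1 = sel v k rs := by
  intro rs
  induction rs with
  | nil => intro v k; simp [selP, sel]
  | cons r rs ih =>
      intro v k
      obtain ⟨rv, rk⟩ := r
      simp only [selP, sel]
      by_cases h : k < rk
      · rw [if_pos h, if_pos h]; exact ih rv rk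
      · rw [if_neg h, if_neg h]; exact ih v k

-- B, characterized as run selection starting at the first run
theorem f_alt_eq_sel (d : Int) (rest : List Int) :
    f_alt (d :: rest) = sel d (((countRun d rest).1 : Int) + 1) (runs ((countRun d rest).2)) := by
  simp only [f_alt]
  rw [rle_eq_runs d rest, runs, max?_selP]
  exact selP_fst_eq_sel _ d _

-- the two initializations agree: the first run has length k ≥ 1, so selecting from
-- (best = d, threshold 1) over (d, k) :: rs equals selecting from (d, k) over rs
theorem sel_first_run (d k : Int) (hk : 1 ≤ k) (rs : List (Int × Int)) :
    sel d 1 ((d, k) :: rs) = sel d k rs := by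
  simp only [sel]
  by_cases h : k > 1
  · rw [if_pos h]
  · have : k = 1 := by omega
    subst this
    rw [if_neg (by omega)]

-- ===== VERDICT (by name: the statement is the Claim_ definition above) =====
theorem f_spec : Claim_equal_f := by
  intro dice _ hpre
  unfold Spec_f
  match dice with
  | [] => exact absurd rfl hpre
  | d :: rest =>
      rw [f_eq_tailA, tailA_eq_sel rest.length rest le_rfl d 1 d, runs,
          f_alt_eq_sel d rest]
      exact sel_first_run d _ (by omega) _
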